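-- pv_equiv track=rewrite | github.com/AugustDanell/Kattis-Assignments | Python/opensource.py | handle_two_sort
-- ===== SOURCE A (Python) =====
-- def handle_two_sort(company_to_score):
--     keys = company_to_score.keys()
--     sorting_func = lambda company: company_to_score[company]
--     sorted_companies = sorted(keys, key = sorting_func, reverse=True)
--     L = []
--     prev = -1
--     l = []
--     for key in sorted_companies:
--         if company_to_score[key] == prev:
--             l.append(key)
--         else:
--             if not prev == -1:
--                 L.append(l)
--             l = [key]
--         prev = company_to_score[key]
--     if len(l) > 0:
--         L.append(l)
--     return L
-- ===== SOURCE B (Python) =====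
-- def handle_two_sort(company_to_score):
--     groups = {}
--     for company, score in company_to_score.items():
--         groups.setdefault(score, []).append(company)
--     return [groups[s] for s in sorted(groups, reverse=True)]
-- ===== Notes on version B (the rewrite author's own statement) =====
-- stated objective: alternative
-- what changed: A stably sorts all companies by score (descending) and then scans the sorted list reconstructing group boundaries with a prev/-1 sentinel; B never sorts the companies: it buckets companies by score into a dict in one pass and emits the buckets for the distinct scores sorted descending.
-- intended difference: On dicts containing both a score equal to -1 and a score below -1, A's prev == -1 sentinel silently drops the whole group of companies scoring -1, while B returns every group in order, which is the intended grouping. — e.g. on handle_two_sort([("a", -1), ("b", -5)]): A returns [["b"]], B returns [["a"], ["b"]]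
import Mathlib
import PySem

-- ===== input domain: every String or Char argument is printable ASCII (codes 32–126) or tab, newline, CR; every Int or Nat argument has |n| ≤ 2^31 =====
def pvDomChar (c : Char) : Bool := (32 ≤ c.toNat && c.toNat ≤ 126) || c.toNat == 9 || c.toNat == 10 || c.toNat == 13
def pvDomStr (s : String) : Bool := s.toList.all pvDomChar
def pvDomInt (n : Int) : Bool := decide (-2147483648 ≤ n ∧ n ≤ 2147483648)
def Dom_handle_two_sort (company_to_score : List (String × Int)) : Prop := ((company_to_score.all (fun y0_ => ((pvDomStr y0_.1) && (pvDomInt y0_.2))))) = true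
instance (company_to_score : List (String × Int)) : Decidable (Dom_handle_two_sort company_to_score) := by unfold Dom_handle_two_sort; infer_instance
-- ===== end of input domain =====

-- B replaces A's global stable sort of companies followed by a run-scan with score buckets
-- built in one pass over the dict plus a sort of the distinct scores (objective: alternative);
-- B also returns the intended grouping where A's -1 sentinel drops a group (see D_ below).


-- ===== PORT A =====
-- the body of A's for-loop over sorted_companies (state = (L, prev, l))
def stepA (d : PySem.Dict String Int) (st : List (List String) × Int × List String)
    (key : String) : List (List String) × Int × List String :=
  if d.getD key 0 = st.2.1 then (st.1, d.getD key 0, st.2.2 ++ [key])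
  else if ¬ st.2.1 = -1 then (st.1 ++ [st.2.2], d.getD key 0, [key])
  else (st.1, d.getD key 0, [key])


def handle_two_sort (company_to_score : List (String × Int)) : List (List String) :=
  let d := PySem.Dict.ofList company_to_score
  let keys := d.keys
  let sorted_companies := PySem.List.sorted keys (fun company => d.getD company 0) true
  let st := sorted_companies.foldl (stepA d) ([], -1, [])
  if st.2.2.length > 0 then st.1 ++ [st.2.2] else st.1

-- ===== PORT B =====
def handle_two_sort_alt (company_to_score : List (String × Int)) : List (List String) :=
  let d := PySem.Dict.ofList company_to_score
  -- for company, score in company_to_score.items(): groups.setdefault(score, []).append(company)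
  let groups := d.items.foldl
    (fun (g : PySem.Dict Int (List String)) p => g.modify p.2 [] (fun cur => cur ++ [p.1]))
    PySem.Dict.empty
  -- [groups[s] for s in sorted(groups, reverse=True)]
  (PySem.List.sorted groups.keys (fun s => s) true).map (fun s => groups.getD s [])

-- ===== PRECONDITION & SPEC =====
-- When the dict holds both a score equal to -1 and a score below -1, A's `prev == -1`
-- sentinel test silently drops the whole group of companies scoring -1, while B keeps that
-- group in its proper place; B's value is the intended grouping.
def D_handle_two_sort (company_to_score : List (String × Int)) : Prop :=
  (∃ v ∈ (PySem.Dict.ofList company_to_score).values, v = -1) ∧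
  (∃ v ∈ (PySem.Dict.ofList company_to_score).values, v < -1)
instance (company_to_score : List (String × Int)) : Decidable (D_handle_two_sort company_to_score) := by unfold D_handle_two_sort; infer_instance

def Spec_handle_two_sort (company_to_score : List (String × Int)) (out : List (List String)) : Prop := ¬ D_handle_two_sort company_to_score → out = handle_two_sort_alt company_to_score
instance (company_to_score : List (String × Int)) (out : List (List String)) : Decidable (Spec_handle_two_sort company_to_score out) := by unfold Spec_handle_two_sort; infer_instance

def pvDiffWitness_handle_two_sort : (List (String × Int)) := [("a", -1), ("b", -5)]
def pvDiffWitnessOut_handle_two_sort : (List (List String)) × (List (List String)) :=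
  ([["b"]], [["a"], ["b"]])

-- ===== CLAIM (what is proved, stated in full; the proofs are below) =====
def Claim_unchanged_handle_two_sort : Prop := ∀ (company_to_score : List (String × Int)), Dom_handle_two_sort company_to_score → Spec_handle_two_sort company_to_score (handle_two_sort company_to_score)
def Claim_changed_handle_two_sort : Prop := Dom_handle_two_sort (pvDiffWitness_handle_two_sort) ∧ D_handle_two_sort (pvDiffWitness_handle_two_sort) ∧ handle_two_sort (pvDiffWitness_handle_two_sort) = pvDiffWitnessOut_handle_two_sort.1 ∧ handle_two_sort_alt (pvDiffWitness_handle_two_sort) = pvDiffWitnessOut_handle_two_sort.2 ∧ pvDiffWitnessOut_handle_two_sort.1 ≠ pvDiffWitnessOut_handle_two_sort.2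

def Claim_exact_handle_two_sort : Prop := ∀ (company_to_score : List (String × Int)), Dom_handle_two_sort company_to_score → D_handle_two_sort company_to_score → handle_two_sort company_to_score ≠ handle_two_sort_alt company_to_score

-- ===== LEMMAS AND PROOFS =====

theorem insertBy_append_of_forall_not {α : Type} (bef : α → α → Bool) (x : α) (P Q : List α)
    (h : ∀ y ∈ P, bef x y = false) :
    PySem.List.insertBy bef x (P ++ Q) = P ++ PySem.List.insertBy bef x Q := by
  induction P with
  | nil => rfl
  | cons p P ih =>
    simp only [List.cons_append, PySem.List.insertBy, h p (by simp)]
    simp only [Bool.false_eq_true, if_false, List.cons.injEq, true_and]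
    exact ih (fun y hy => h y (by simp [hy]))

theorem insertBy_cons_of_before {α : Type} (bef : α → α → Bool) (x y : α) (ys : List α)
    (h : bef x y = true) :
    PySem.List.insertBy bef x (y :: ys) = x :: y :: ys := by
  simp [PySem.List.insertBy, h]

theorem sorted_rev_ofList_pairwise_gt (xs : List Int) :
    (PySem.List.sorted (PySem.Set.ofList xs) (fun s => s) true).Pairwise (· > ·) := by
  have h1 : (PySem.List.sorted (PySem.Set.ofList xs) (fun s => s) true).Pairwise
      (fun a b => b ≤ a) := PySem.List.sorted_pairwise_rev _ _
  have h2 : (PySem.List.sorted (PySem.Set.ofList xs) (fun s => s) true).Nodup :=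
    (PySem.List.sorted_perm _ _ _).nodup_iff.mpr (PySem.Set.nodup_ofList xs)
  exact (List.pairwise_and_iff.mpr ⟨h1, h2⟩).imp (fun h => lt_of_le_of_ne h.1 h.2.symm)

theorem sorted_rev_append_singleton {α : Type} (xs : List α) (x : α) (key : α → Int) :
    PySem.List.sorted (xs ++ [x]) key true =
      PySem.List.insertBy (fun a b => decide (key b < key a)) x
        (PySem.List.sorted xs key true) := by
  rw [PySem.List.sorted_rev_eq_foldl_insertBy, PySem.List.sorted_rev_eq_foldl_insertBy,
    List.foldl_append]
  rfl

-- decomposition of a strictly decreasing list around a pivot sx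
theorem decomp_gt (S : List Int) (hS : S.Pairwise (· > ·)) (sx : Int) :
    S = S.takeWhile (fun s => decide (sx < s)) ++ S.dropWhile (fun s => decide (sx < s)) ∧
    (∀ s ∈ S.takeWhile (fun s => decide (sx < s)), sx < s) ∧
    (sx ∈ S → ∃ rest, S.dropWhile (fun s => decide (sx < s)) = sx :: rest ∧ ∀ s ∈ rest, s < sx) ∧
    (sx ∉ S → ∀ s ∈ S.dropWhile (fun s => decide (sx < s)), s < sx) := by
  refine ⟨(List.takeWhile_append_dropWhile).symm, ?_, ?_, ?_⟩
  · intro s hs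
    simpa using List.mem_takeWhile_imp hs
  · intro hmem
    cases hd : S.dropWhile (fun s => decide (sx < s)) with
    | nil =>
      exfalso
      have heq : S.takeWhile (fun s => decide (sx < s)) = S := by
        have h0 := List.takeWhile_append_dropWhile (p := fun s => decide (sx < s)) (l := S)
        rw [hd, List.append_nil] at h0; exact h0
      have hmem' : sx ∈ S.takeWhile (fun s => decide (sx < s)) := by rw [heq]; exact hmem
      have := List.mem_takeWhile_imp hmem'
      simp at this
    | cons s0 rest =>
      have hs0 : ¬ sx < s0 := by
        have := List.head_dropWhile_not (p := fun s => decide (sx < s)) (l := S) (by simp [hd])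
        simpa [hd] using this
      have hpd : (s0 :: rest).Pairwise (· > ·) := by
        rw [← hd]; exact hS.sublist (List.dropWhile_sublist _)
      have hrest : ∀ s ∈ rest, s < s0 := by
        rw [List.pairwise_cons] at hpd
        exact fun s hs => hpd.1 s hs
      have hsx : sx = s0 := by
        have hmem2 : sx ∈ s0 :: rest := by
          have := List.takeWhile_append_dropWhile (p := fun s => decide (sx < s)) (l := S)
          rw [hd] at this
          rw [← this] at hmem
          rcases List.mem_append.mp hmem with h | h
          · have := List.mem_takeWhile_imp h; simp at this
          · exact h
        rcases List.mem_cons.mp hmem2 with h | h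
        · exact h
        · exact absurd (hrest _ h) (by omega)
      exact ⟨rest, by rw [hsx], fun s hs => by rw [hsx]; exact hrest s hs⟩
  · intro hnmem s hs
    cases hd : S.dropWhile (fun s => decide (sx < s)) with
    | nil => rw [hd] at hs; simp at hs
    | cons s0 rest =>
      have hs0 : ¬ sx < s0 := by
        have := List.head_dropWhile_not (p := fun s => decide (sx < s)) (l := S) (by simp [hd])
        simpa [hd] using this
      have hpd : (s0 :: rest).Pairwise (· > ·) := by
        rw [← hd]; exact hS.sublist (List.dropWhile_sublist _)
      have hs0ne : s0 ≠ sx := by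
        intro h
        apply hnmem
        have : s0 ∈ S := List.Sublist.mem (l₁ := s0 :: rest) (by simp)
          (by rw [← hd]; exact List.dropWhile_sublist _)
        rwa [h] at this
      rw [hd] at hs
      rcases List.mem_cons.mp hs with h | h
      · omega
      · rw [List.pairwise_cons] at hpd
        have := hpd.1 s h
        omega

theorem insertBy_flatMap_lt {α : Type} (key : α → Int) (x : α) (ts : List Int) (xs : List α)
    (hne : ∀ s ∈ ts, xs.filter (fun y => key y == s) ≠ [])
    (hlt : ∀ s ∈ ts, s < key x) :
    PySem.List.insertBy (fun a b => decide (key b < key a)) x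
        (ts.flatMap (fun s => xs.filter (fun y => key y == s))) =
      x :: ts.flatMap (fun s => xs.filter (fun y => key y == s)) := by
  cases ts with
  | nil => rfl
  | cons r ts' =>
    obtain ⟨y0, g', hg⟩ := List.exists_cons_of_ne_nil (hne r (by simp))
    have hy0 : key y0 = r := by
      have : y0 ∈ xs.filter (fun y => key y == r) := by rw [hg]; simp
      simpa using (List.mem_filter.mp this).2
    rw [List.flatMap_cons, hg, List.cons_append]
    exact insertBy_cons_of_before _ _ _ _ (by simp [hy0]; exact hlt r (by simp))

theorem sorted_rev_eq_flatMap_filter {α : Type} (xs : List α) (key : α → Int) :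
    PySem.List.sorted xs key true =
      (PySem.List.sorted (PySem.Set.ofList (xs.map key)) (fun s => s) true).flatMap
        (fun s => xs.filter (fun x => key x == s)) := by
  induction xs using List.reverseRecOn with
  | nil => rfl
  | append_singleton xs x ih =>
    have hS : (PySem.List.sorted (PySem.Set.ofList (xs.map key)) (fun s => s) true).Pairwise
        (· > ·) := sorted_rev_ofList_pairwise_gt _
    set S := PySem.List.sorted (PySem.Set.ofList (xs.map key)) (fun s => s) true with hSdef
    set sx := key x with hsx
    obtain ⟨hsplit, ht₁, hmemcase, hnmemcase⟩ := decomp_gt S hS sx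
    set t₁ := S.takeWhile (fun s => decide (sx < s)) with ht1def
    set t₂ := S.dropWhile (fun s => decide (sx < s)) with ht2def
    -- basic group facts
    have hgrp_ne : ∀ s ∈ S, xs.filter (fun y => key y == s) ≠ [] := by
      intro s hs
      have : s ∈ xs.map key := by
        have := (PySem.List.mem_sorted _ _ _ _).mp (hSdef ▸ hs)
        simpa [PySem.Set.mem_ofList] using this
      obtain ⟨a, ha, hka⟩ := List.mem_map.mp this
      intro hnil
      have : a ∈ xs.filter (fun y => key y == s) := List.mem_filter.mpr ⟨ha, by simp [hka]⟩
      rw [hnil] at this; exact (List.not_mem_nil).elim this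
    have hkey_of_mem : ∀ (s : Int), ∀ y ∈ xs.filter (fun y => key y == s), key y = s := by
      intro s y hy; simpa using (List.mem_filter.mp hy).2
    -- the new group function
    have hgrp' : ∀ s : Int, (xs ++ [x]).filter (fun y => key y == s) =
        xs.filter (fun y => key y == s) ++ (if sx = s then [x] else []) := by
      intro s
      rw [List.filter_append]
      congr 1
      by_cases h : sx = s <;> simp [← hsx, h]
    rw [sorted_rev_append_singleton, ih]
    by_cases hmem : sx ∈ S
    · -- the pivot score already occurs: the set of scores is unchanged
      obtain ⟨rest, ht₂, hrest⟩ := hmemcase hmem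
      have hsetS : PySem.Set.ofList ((xs ++ [x]).map key) = PySem.Set.ofList (xs.map key) := by
        rw [List.map_append, List.map_cons, List.map_nil, PySem.Set.ofList_append_singleton,
          PySem.Set.add_of_mem]
        rw [PySem.Set.mem_ofList]
        have := (PySem.List.mem_sorted _ _ _ _).mp (hSdef ▸ hmem)
        simpa [PySem.Set.mem_ofList] using this
      rw [hsetS, ← hSdef]
      -- rewrite S as t₁ ++ sx :: rest on both sides
      rw [show S = t₁ ++ sx :: rest from by rw [hsplit, ht₂]]
      rw [List.flatMap_append, List.flatMap_cons, ← List.append_assoc]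
      rw [insertBy_append_of_forall_not _ x _ _ (by
        intro y hy
        rcases List.mem_append.mp hy with h | h
        · obtain ⟨s, hsmem, hymem⟩ := List.mem_flatMap.mp h
          have := hkey_of_mem s y hymem
          have hlt := ht₁ s hsmem
          simp [this]; omega
        · have := hkey_of_mem sx y h
          simp [this, ← hsx])]
      rw [insertBy_flatMap_lt key x rest xs
        (fun s hs => hgrp_ne s (by
          rw [hsplit, ht₂]; exact List.mem_append.mpr (Or.inr (by simp [hs]))))
        (fun s hs => hrest s hs)]
      -- now both sides are plain concatenations
      rw [List.flatMap_append, List.flatMap_cons]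
      have hcongr : ∀ (ts : List Int), (∀ s ∈ ts, sx ≠ s) →
          ts.flatMap (fun s => (xs ++ [x]).filter (fun y => key y == s)) =
          ts.flatMap (fun s => xs.filter (fun y => key y == s)) := by
        intro ts hts
        apply List.flatMap_congr
        intro s hs
        rw [hgrp', if_neg (hts s hs), List.append_nil]
      rw [hcongr t₁ (fun s hs => by have := ht₁ s hs; omega),
        hcongr rest (fun s hs => by have := hrest s hs; omega),
        hgrp' sx, if_pos rfl]
      simp
    · -- new pivot score: it is inserted between t₁ and t₂
      have hnmem' : sx ∉ xs.map key := by
        intro h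
        exact hmem ((PySem.List.mem_sorted _ _ _ _).mpr (by simpa [PySem.Set.mem_ofList] using h))
      have hset' : PySem.Set.ofList ((xs ++ [x]).map key) =
          PySem.Set.ofList (xs.map key) ++ [sx] := by
        rw [List.map_append, List.map_cons, List.map_nil, PySem.Set.ofList_append_singleton,
          PySem.Set.add_of_not_mem]
        simpa [PySem.Set.mem_ofList] using hnmem'
      have ht₂lt := hnmemcase hmem
      have hpair : (t₁ ++ sx :: t₂).Pairwise (fun a b => b < a) := by
        rw [List.pairwise_append]
        have hSp := hsplit ▸ hS
        rw [List.pairwise_append] at hSp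
        refine ⟨hSp.1, ?_, ?_⟩
        · rw [List.pairwise_cons]
          exact ⟨fun s hs => ht₂lt s hs, hSp.2.1⟩
        · intro a ha b hb
          rcases List.mem_cons.mp hb with h | h
          · rw [h]; exact ht₁ a ha
          · exact hSp.2.2 a ha b h
      have hsorted' : PySem.List.sorted (PySem.Set.ofList (xs.map key) ++ [sx])
          (fun s => s) true = t₁ ++ sx :: t₂ := by
        apply PySem.List.sorted_rev_eq_of_perm_of_pairwise_gt _ _ _ _ hpair
        have hperm : S.Perm (PySem.Set.ofList (xs.map key)) :=
          hSdef ▸ PySem.List.sorted_perm _ _ _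
        refine List.Perm.trans List.perm_middle ?_
        refine List.Perm.trans (List.Perm.cons sx (hsplit ▸ hperm)) ?_
        exact (List.perm_append_singleton _ _).symm
      rw [hset', hsorted']
      have hgrp_sx : xs.filter (fun y => key y == sx) = [] := by
        rw [List.filter_eq_nil_iff]
        intro a ha hk
        exact hnmem' (List.mem_map.mpr ⟨a, ha, by simpa using hk⟩)
      -- left side: insert x after all the groups of t₁
      rw [hsplit, List.flatMap_append]
      rw [insertBy_append_of_forall_not _ x _ _ (by
        intro y hy
        obtain ⟨s, hsmem, hymem⟩ := List.mem_flatMap.mp hy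
        have := hkey_of_mem s y hymem
        have hlt := ht₁ s hsmem
        simp [this]; omega)]
      rw [insertBy_flatMap_lt key x t₂ xs
        (fun s hs => hgrp_ne s (hsplit ▸ List.mem_append.mpr (Or.inr hs)))
        (fun s hs => ht₂lt s hs)]
      -- right side
      rw [List.flatMap_append, List.flatMap_cons]
      have hcongr : ∀ (ts : List Int), (∀ s ∈ ts, sx ≠ s) →
          ts.flatMap (fun s => (xs ++ [x]).filter (fun y => key y == s)) =
          ts.flatMap (fun s => xs.filter (fun y => key y == s)) := by
        intro ts hts
        apply List.flatMap_congr
        intro s hs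
        rw [hgrp', if_neg (hts s hs), List.append_nil]
      rw [hcongr t₁ (fun s hs => by have := ht₁ s hs; omega),
        hcongr t₂ (fun s hs => by have := ht₂lt s hs; omega),
        hgrp' sx, if_pos rfl, hgrp_sx]
      simp

theorem runA_const (d : PySem.Dict String Int) (s : Int) (g : List String)
    (L : List (List String)) (l : List String) (hg : ∀ k ∈ g, d.getD k 0 = s) :
    g.foldl (stepA d) (L, s, l) = (L, s, l ++ g) := by
  induction g generalizing l with
  | nil => simp
  | cons k g ih =>
    have hk := hg k (by simp)
    simp only [List.foldl_cons, stepA, hk, if_true]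
    rw [ih _ (fun k hk => hg k (by simp [hk]))]
    simp

theorem runA_group (d : PySem.Dict String Int) (s : Int) (g : List String)
    (L : List (List String)) (prev : Int) (l : List String)
    (hg : g ≠ []) (hall : ∀ k ∈ g, d.getD k 0 = s) (hne : prev ≠ s) :
    g.foldl (stepA d) (L, prev, l) = ((if prev = -1 then L else L ++ [l]), s, g) := by
  cases g with
  | nil => exact absurd rfl hg
  | cons k g =>
    have hk := hall k (by simp)
    simp only [List.foldl_cons, stepA, hk]
    rw [if_neg (fun h => hne h.symm)]
    by_cases hp : prev = -1
    · simp only [hp, if_true, not_true, if_false]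
      rw [runA_const d s g L [k] (fun k hk => hall k (by simp [hk]))]
      simp
    · simp only [if_neg hp, if_pos (by simpa using hp)]
      rw [runA_const d s g (L ++ [l]) [k] (fun k hk => hall k (by simp [hk]))]
      simp

def finishA (st : List (List String) × Int × List String) : List (List String) :=
  if st.2.2.length > 0 then st.1 ++ [st.2.2] else st.1

theorem runA_tail (d : PySem.Dict String Int) (ss : List Int) (group : Int → List String)
    (hsort : ss.Pairwise (· > ·))
    (hne : ∀ s ∈ ss, group s ≠ [])
    (hcons : ∀ s ∈ ss, ∀ k ∈ group s, d.getD k 0 = s)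
    (hlast : -1 ∈ ss → ∀ s ∈ ss, -1 ≤ s)
    (L : List (List String)) (prev : Int) (l : List String)
    (hl : l ≠ []) (hprev : prev ≠ -1) (hgt : ∀ s ∈ ss, s < prev) :
    finishA ((ss.flatMap group).foldl (stepA d) (L, prev, l)) = L ++ [l] ++ ss.map group := by
  induction ss generalizing L prev l with
  | nil =>
    simp [finishA, List.length_pos_iff.mpr hl]
  | cons s ss ih =>
    simp only [List.flatMap_cons, List.foldl_append]
    rw [runA_group d s (group s) L prev l (hne s (by simp)) (hcons s (by simp))
        (fun h => absurd (hgt s (by simp)) (by simp [h])), if_neg hprev]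
    cases ss with
    | nil =>
      simp [finishA, List.length_pos_iff.mpr (hne s (by simp))]
    | cons t ss' =>
      have hs1 : s ≠ -1 := by
        intro h
        have ht : t < s := by
          have := hsort; rw [List.pairwise_cons] at this
          exact this.1 t (by simp)
        have := hlast (by simp [h]) t (by simp)
        omega
      rw [ih (hsort.of_cons)
          (fun u hu => hne u (by simp [hu]))
          (fun u hu => hcons u (by simp [hu]))
          (fun h u hu => hlast (by simp [h]) u (by simp [hu]))
          (L ++ [l]) s (group s) (hne s (by simp)) hs1
          (fun u hu => by
            have := hsort; rw [List.pairwise_cons] at this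
            exact this.1 u hu)]
      simp

theorem runA_top (d : PySem.Dict String Int) (ss : List Int) (group : Int → List String)
    (hsort : ss.Pairwise (· > ·))
    (hne : ∀ s ∈ ss, group s ≠ [])
    (hcons : ∀ s ∈ ss, ∀ k ∈ group s, d.getD k 0 = s)
    (hlast : -1 ∈ ss → ∀ s ∈ ss, -1 ≤ s) :
    finishA ((ss.flatMap group).foldl (stepA d) ([], -1, [])) = ss.map group := by
  cases ss with
  | nil => simp [finishA]
  | cons s ss =>
    simp only [List.flatMap_cons, List.foldl_append]
    by_cases hs1 : s = -1
    · -- prev = -1 = s: the first group is appended onto the empty l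
      have hss : ss = [] := by
        cases ss with
        | nil => rfl
        | cons t ss' =>
          have ht : t < s := by
            have := hsort; rw [List.pairwise_cons] at this
            exact this.1 t (by simp)
          have := hlast (by simp [hs1]) t (by simp)
          omega
      subst hss hs1
      obtain ⟨k, g, hkg⟩ := List.exists_cons_of_ne_nil (hne (-1) (by simp))
      rw [hkg]
      have hk : d.getD k 0 = -1 := by
        have := hcons (-1) (by simp) k (by simp [hkg]); exact this
      simp only [List.foldl_cons, stepA, hk, if_true, List.nil_append]
      rw [runA_const d (-1) g [] [k]
        (fun u hu => hcons (-1) (by simp) u (by simp [hkg, hu]))]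
      simp [finishA, hkg]
    · rw [runA_group d s (group s) [] (-1) [] (hne s (by simp)) (hcons s (by simp))
          (fun h => hs1 h.symm), if_pos rfl]
      cases ss with
      | nil => simp [finishA, List.length_pos_iff.mpr (hne s (by simp))]
      | cons t ss' =>
        rw [runA_tail d (t :: ss') group hsort.of_cons
            (fun u hu => hne u (by simp [hu]))
            (fun u hu => hcons u (by simp [hu]))
            (fun h u hu => hlast (by simp [h]) u (by simp [hu]))
            [] s (group s) (hne s (by simp)) hs1
            (fun u hu => by
              have := hsort; rw [List.pairwise_cons] at this
              exact this.1 u hu)]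
        simp

theorem core (d : PySem.Dict String Int) (hnd : d.keys.Nodup)
    (hD : ¬ ((∃ v ∈ d.values, v = -1) ∧ (∃ v ∈ d.values, v < -1))) :
    (let sorted_companies := PySem.List.sorted d.keys (fun company => d.getD company 0) true
     let st := sorted_companies.foldl (stepA d) ([], -1, [])
     if st.2.2.length > 0 then st.1 ++ [st.2.2] else st.1) =
    (let groups := d.items.foldl
        (fun (g : PySem.Dict Int (List String)) p => g.modify p.2 [] (fun cur => cur ++ [p.1]))
        PySem.Dict.empty
     (PySem.List.sorted groups.keys (fun s => s) true).map (fun s => groups.getD s [])) := by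
  have hvals : d.items.map (fun p => d.getD p.1 0) = d.items.map (fun p => p.2) :=
    List.map_congr_left (by
      rintro ⟨k, v⟩ hp
      exact PySem.Dict.getD_of_mem_items d hp hnd 0)
  have hkeysmap : d.keys.map (fun c => d.getD c 0) = d.items.map (fun p => p.2) := by
    show (d.items.map (fun p => p.1)).map (fun c => d.getD c 0) = _
    rw [List.map_map]; exact hvals
  -- the common group function
  have hgrp : ∀ s : Int, d.keys.filter (fun k => d.getD k 0 == s) =
      (d.items.filter (fun p => p.2 == s)).map (fun p => p.1) := by
    intro s
    show List.filter _ (d.items.map (fun p => p.1)) = _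
    rw [List.filter_map]
    congr 1
    apply List.filter_congr
    rintro ⟨k, v⟩ hp
    simp only [Function.comp]
    rw [PySem.Dict.getD_of_mem_items d hp hnd 0]
  set S := PySem.List.sorted (PySem.Set.ofList (d.items.map (fun p => p.2))) (fun s => s) true
    with hSdef
  -- A's side
  show (if ((PySem.List.sorted d.keys (fun c => d.getD c 0) true).foldl
        (stepA d) ([], -1, [])).2.2.length > 0
      then _ ++ [((PySem.List.sorted d.keys (fun c => d.getD c 0) true).foldl
        (stepA d) ([], -1, [])).2.2]
      else ((PySem.List.sorted d.keys (fun c => d.getD c 0) true).foldl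
        (stepA d) ([], -1, [])).1) = _
  rw [sorted_rev_eq_flatMap_filter d.keys (fun c => d.getD c 0), hkeysmap]
  have hA := runA_top d S (fun s => d.keys.filter (fun k => d.getD k 0 == s))
    (sorted_rev_ofList_pairwise_gt _)
    (by
      intro s hs
      have hsv : s ∈ d.items.map (fun p => p.2) := by
        have := (PySem.List.mem_sorted _ _ _ _).mp hs
        simpa [PySem.Set.mem_ofList] using this
      obtain ⟨p, hp, hps⟩ := List.mem_map.mp hsv
      obtain ⟨k, v⟩ := p
      intro hnil
      simp only [List.eq_nil_iff_forall_not_mem] at hnil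
      apply hnil k
      apply List.mem_filter.mpr
      refine ⟨List.mem_map.mpr ⟨(k, v), hp, rfl⟩, ?_⟩
      rw [PySem.Dict.getD_of_mem_items d hp hnd 0]
      simp only [beq_iff_eq]
      exact hps)
    (by
      intro s hs k hk
      simpa using (List.mem_filter.mp hk).2)
    (by
      intro hm1 s hs
      have hv1 : (-1 : Int) ∈ d.values := by
        show (-1 : Int) ∈ d.items.map (fun p => p.2)
        have := (PySem.List.mem_sorted _ _ _ _).mp hm1
        rwa [PySem.Set.mem_ofList] at this
      have hvs : s ∈ d.values := by
        show s ∈ d.items.map (fun p => p.2)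
        have := (PySem.List.mem_sorted _ _ _ _).mp hs
        rwa [PySem.Set.mem_ofList] at this
      by_contra hlt
      exact hD ⟨⟨-1, hv1, rfl⟩, ⟨s, hvs, by omega⟩⟩)
  unfold finishA at hA
  rw [hA]
  -- B's side
  have hBkeys : (d.items.foldl
      (fun (g : PySem.Dict Int (List String)) p => g.modify p.2 [] (fun cur => cur ++ [p.1]))
      PySem.Dict.empty).keys = PySem.Set.ofList (d.items.map (fun p => p.2)) := by
    rw [PySem.Dict.keys_foldl_modify_key d.items (fun p => p.2) []
      (fun g p => fun cur => cur ++ [p.1]) PySem.Dict.empty]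
    rw [PySem.Dict.keys_empty, PySem.Set.update_nil_left]
  have hBgetD : ∀ s : Int, (d.items.foldl
      (fun (g : PySem.Dict Int (List String)) p => g.modify p.2 [] (fun cur => cur ++ [p.1]))
      PySem.Dict.empty).getD s [] = (d.items.filter (fun p => p.2 == s)).map (fun p => p.1) := by
    intro s
    have hswap : d.items.foldl
        (fun (g : PySem.Dict Int (List String)) p => g.modify p.2 [] (fun cur => cur ++ [p.1]))
        PySem.Dict.empty =
      (d.items.map (fun p => (p.2, p.1))).foldl
        (fun (g : PySem.Dict Int (List String)) q => g.modify q.1 [] (fun cur => cur ++ [q.2]))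
        PySem.Dict.empty := by
      rw [List.foldl_map]
    rw [hswap, PySem.Dict.getD_foldl_modify_append, PySem.Dict.getD_empty, List.nil_append]
    rw [List.filter_map]
    rw [List.map_map]
    rfl
  show _ = (PySem.List.sorted (d.items.foldl
      (fun (g : PySem.Dict Int (List String)) p => g.modify p.2 [] (fun cur => cur ++ [p.1]))
      PySem.Dict.empty).keys (fun s => s) true).map _
  rw [hBkeys, ← hSdef]
  apply List.map_congr_left
  intro s _
  rw [hgrp s, hBgetD s]


theorem runA_tail_drop (d : PySem.Dict String Int) (sa sb : List Int) (group : Int → List String)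
    (hsort : (sa ++ -1 :: sb).Pairwise (· > ·))
    (hne : ∀ s ∈ sa ++ -1 :: sb, group s ≠ [])
    (hcons : ∀ s ∈ sa ++ -1 :: sb, ∀ k ∈ group s, d.getD k 0 = s)
    (hsb : sb ≠ [])
    (L : List (List String)) (prev : Int) (l : List String)
    (hl : l ≠ []) (hprev : prev ≠ -1) (hgt : ∀ s ∈ sa ++ -1 :: sb, s < prev) :
    finishA (((sa ++ -1 :: sb).flatMap group).foldl (stepA d) (L, prev, l)) =
      L ++ [l] ++ (sa ++ sb).map group := by
  induction sa generalizing L prev l with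
  | nil =>
    simp only [List.nil_append] at hsort hne hcons hgt ⊢
    simp only [List.flatMap_cons, List.foldl_append]
    rw [runA_group d (-1) (group (-1)) L prev l (hne (-1) (by simp)) (hcons (-1) (by simp))
        hprev, if_neg hprev]
    cases sb with
    | nil => exact absurd rfl hsb
    | cons s₂ sb' =>
      have hs₂ : s₂ < -1 := by
        rw [List.pairwise_cons] at hsort
        exact hsort.1 s₂ (by simp)
      simp only [List.flatMap_cons, List.foldl_append]
      rw [runA_group d s₂ (group s₂) (L ++ [l]) (-1) (group (-1))
          (hne s₂ (by simp)) (hcons s₂ (by simp)) (by omega), if_pos rfl]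
      have hsort' : (s₂ :: sb').Pairwise (· > ·) := hsort.of_cons
      cases sb' with
      | nil => simp [finishA, List.length_pos_iff.mpr (hne s₂ (by simp))]
      | cons t sb'' =>
        rw [runA_tail d (t :: sb'') group hsort'.of_cons
            (fun u hu => hne u (by simp [hu]))
            (fun u hu => hcons u (by simp [hu]))
            (by
              intro h
              exfalso
              rw [List.pairwise_cons] at hsort'
              have := hsort'.1 (-1) (by simpa using h)
              omega)
            (L ++ [l]) s₂ (group s₂) (hne s₂ (by simp)) (by omega)
            (fun u hu => by
              rw [List.pairwise_cons] at hsort'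
              exact hsort'.1 u hu)]
        simp
  | cons a sa' ih =>
    simp only [List.cons_append, List.flatMap_cons, List.foldl_append]
    rw [runA_group d a (group a) L prev l (hne a (by simp)) (hcons a (by simp))
        (fun h => absurd (hgt a (by simp)) (by simp [h])), if_neg hprev]
    have ha : a ≠ -1 := by
      rw [List.cons_append, List.pairwise_cons] at hsort
      have := hsort.1 (-1) (by simp)
      omega
    rw [ih (by rw [List.cons_append, List.pairwise_cons] at hsort; exact hsort.2)
        (fun u hu => hne u (by simp [hu]))
        (fun u hu => hcons u (by simp [hu]))
        (L ++ [l]) a (group a) (hne a (by simp)) ha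
        (fun u hu => by
          rw [List.cons_append, List.pairwise_cons] at hsort
          exact hsort.1 u hu)]
    simp

theorem runA_top_drop (d : PySem.Dict String Int) (sa sb : List Int) (group : Int → List String)
    (hsort : (sa ++ -1 :: sb).Pairwise (· > ·))
    (hne : ∀ s ∈ sa ++ -1 :: sb, group s ≠ [])
    (hcons : ∀ s ∈ sa ++ -1 :: sb, ∀ k ∈ group s, d.getD k 0 = s)
    (hsb : sb ≠ []) :
    finishA (((sa ++ -1 :: sb).flatMap group).foldl (stepA d) ([], -1, [])) =
      (sa ++ sb).map group := by
  cases sa with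
  | nil =>
    simp only [List.nil_append] at hsort hne hcons ⊢
    simp only [List.flatMap_cons, List.foldl_append]
    obtain ⟨k, g, hkg⟩ := List.exists_cons_of_ne_nil (hne (-1) (by simp))
    rw [hkg]
    have hk : d.getD k 0 = -1 := hcons (-1) (by simp) k (by simp [hkg])
    simp only [List.foldl_cons, stepA, hk, if_true, List.nil_append]
    rw [runA_const d (-1) g [] [k] (fun u hu => hcons (-1) (by simp) u (by simp [hkg, hu]))]
    simp only [List.singleton_append]
    cases sb with
    | nil => exact absurd rfl hsb
    | cons s₂ sb' =>
      have hs₂ : s₂ < -1 := by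
        rw [List.pairwise_cons] at hsort
        exact hsort.1 s₂ (by simp)
      simp only [List.flatMap_cons, List.foldl_append]
      rw [show (k :: g : List String) = group (-1) from hkg.symm]
      rw [runA_group d s₂ (group s₂) [] (-1) (group (-1))
          (hne s₂ (by simp)) (hcons s₂ (by simp)) (by omega), if_pos rfl]
      have hsort' : (s₂ :: sb').Pairwise (· > ·) := hsort.of_cons
      cases sb' with
      | nil => simp [finishA, List.length_pos_iff.mpr (hne s₂ (by simp))]
      | cons t sb'' =>
        rw [runA_tail d (t :: sb'') group hsort'.of_cons
            (fun u hu => hne u (by simp [hu]))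
            (fun u hu => hcons u (by simp [hu]))
            (by
              intro h
              exfalso
              rw [List.pairwise_cons] at hsort'
              have := hsort'.1 (-1) (by simpa using h)
              omega)
            [] s₂ (group s₂) (hne s₂ (by simp)) (by omega)
            (fun u hu => by
              rw [List.pairwise_cons] at hsort'
              exact hsort'.1 u hu)]
        simp
  | cons a sa' =>
    simp only [List.cons_append, List.flatMap_cons, List.foldl_append]
    have ha : a ≠ -1 := by
      rw [List.cons_append, List.pairwise_cons] at hsort
      have := hsort.1 (-1) (by simp)
      omega
    rw [runA_group d a (group a) [] (-1) [] (hne a (by simp)) (hcons a (by simp))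
        (fun h => ha h.symm), if_pos rfl]
    rw [runA_tail_drop d sa' sb group
        (by rw [List.cons_append, List.pairwise_cons] at hsort; exact hsort.2)
        (fun u hu => hne u (by simp [hu]))
        (fun u hu => hcons u (by simp [hu])) hsb
        [] a (group a) (hne a (by simp)) ha
        (fun u hu => by
          rw [List.cons_append, List.pairwise_cons] at hsort
          exact hsort.1 u hu)]
    simp

theorem core_drop (d : PySem.Dict String Int) (hnd : d.keys.Nodup)
    (hD : (∃ v ∈ d.values, v = -1) ∧ (∃ v ∈ d.values, v < -1)) :
    (let sorted_companies := PySem.List.sorted d.keys (fun company => d.getD company 0) true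
     let st := sorted_companies.foldl (stepA d) ([], -1, [])
     if st.2.2.length > 0 then st.1 ++ [st.2.2] else st.1) ≠
    (let groups := d.items.foldl
        (fun (g : PySem.Dict Int (List String)) p => g.modify p.2 [] (fun cur => cur ++ [p.1]))
        PySem.Dict.empty
     (PySem.List.sorted groups.keys (fun s => s) true).map (fun s => groups.getD s [])) := by
  have hkeysmap : d.keys.map (fun c => d.getD c 0) = d.items.map (fun p => p.2) := by
    show (d.items.map (fun p => p.1)).map (fun c => d.getD c 0) = _
    rw [List.map_map]
    exact List.map_congr_left (by
      rintro ⟨k, v⟩ hp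
      exact PySem.Dict.getD_of_mem_items d hp hnd 0)
  set S := PySem.List.sorted (PySem.Set.ofList (d.items.map (fun p => p.2))) (fun s => s) true
    with hSdef
  have hS : S.Pairwise (· > ·) := sorted_rev_ofList_pairwise_gt _
  obtain ⟨hsplit, ht₁, hmemcase, _⟩ := decomp_gt S hS (-1)
  obtain ⟨ta, hta⟩ : ∃ ta, S.takeWhile (fun s => decide ((-1 : Int) < s)) = ta := ⟨_, rfl⟩
  rw [hta] at hsplit ht₁
  have hmem : (-1 : Int) ∈ S := by
    obtain ⟨v, hv, hv1⟩ := hD.1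
    apply (PySem.List.mem_sorted _ _ _ _).mpr
    rw [PySem.Set.mem_ofList]
    exact hv1 ▸ hv
  obtain ⟨rest, ht₂, hrest⟩ := hmemcase hmem
  have hrest_ne : rest ≠ [] := by
    obtain ⟨v, hv, hvlt⟩ := hD.2
    have hvS : v ∈ S := by
      apply (PySem.List.mem_sorted _ _ _ _).mpr
      rw [PySem.Set.mem_ofList]
      exact hv
    rw [hsplit, List.mem_append] at hvS
    rcases hvS with h | h
    · have := ht₁ v h; omega
    · rw [ht₂] at h
      rcases List.mem_cons.mp h with h | h
      · omega
      · exact List.ne_nil_of_mem h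
  have hSeq : S = ta ++ -1 :: rest := by
    rw [hsplit, ht₂]
  -- common group facts (as in `core`)
  have hne : ∀ s ∈ S, d.keys.filter (fun k => d.getD k 0 == s) ≠ [] := by
    intro s hs
    have hsv : s ∈ d.items.map (fun p => p.2) := by
      have := (PySem.List.mem_sorted _ _ _ _).mp hs
      rwa [PySem.Set.mem_ofList] at this
    obtain ⟨p, hp, hps⟩ := List.mem_map.mp hsv
    obtain ⟨k, v⟩ := p
    intro hnil
    simp only [List.eq_nil_iff_forall_not_mem] at hnil
    apply hnil k
    apply List.mem_filter.mpr
    refine ⟨List.mem_map.mpr ⟨(k, v), hp, rfl⟩, ?_⟩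
    rw [PySem.Dict.getD_of_mem_items d hp hnd 0]
    simp only [beq_iff_eq]
    exact hps
  have hcons : ∀ (s : Int), ∀ k ∈ d.keys.filter (fun k => d.getD k 0 == s), d.getD k 0 = s := by
    intro s k hk
    simpa using (List.mem_filter.mp hk).2
  -- A's value inside D_: the -1 group is dropped
  have hA : (let sorted_companies :=
        PySem.List.sorted d.keys (fun company => d.getD company 0) true
      let st := sorted_companies.foldl (stepA d) ([], -1, [])
      if st.2.2.length > 0 then st.1 ++ [st.2.2] else st.1) =
      (ta ++ rest).map
        (fun s => d.keys.filter (fun k => d.getD k 0 == s)) := by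
    show (if ((PySem.List.sorted d.keys (fun c => d.getD c 0) true).foldl
          (stepA d) ([], -1, [])).2.2.length > 0
        then _ ++ [((PySem.List.sorted d.keys (fun c => d.getD c 0) true).foldl
          (stepA d) ([], -1, [])).2.2]
        else ((PySem.List.sorted d.keys (fun c => d.getD c 0) true).foldl
          (stepA d) ([], -1, [])).1) = _
    rw [sorted_rev_eq_flatMap_filter d.keys (fun c => d.getD c 0), hkeysmap, ← hSdef, hSeq]
    have := runA_top_drop d ta rest
      (fun s => d.keys.filter (fun k => d.getD k 0 == s))
      (hSeq ▸ hS)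
      (fun s hs => hne s (hSeq ▸ hs))
      (fun s hs k hk => hcons s k hk)
      hrest_ne
    unfold finishA at this
    exact this
  -- B's value: every group, one per distinct score
  have hB : ((let groups := d.items.foldl
                (fun (g : PySem.Dict Int (List String)) p => g.modify p.2 [] (fun cur => cur ++ [p.1]))
                PySem.Dict.empty
              (PySem.List.sorted groups.keys (fun s => s) true).map (fun s => groups.getD s []) :
        List (List String))).length = S.length := by
    show ((PySem.List.sorted (d.items.foldl
        (fun (g : PySem.Dict Int (List String)) p => g.modify p.2 [] (fun cur => cur ++ [p.1]))
        PySem.Dict.empty).keys (fun s => s) true).map _).length = _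
    rw [PySem.Dict.keys_foldl_modify_key d.items (fun p => p.2) []
      (fun g p => fun cur => cur ++ [p.1]) PySem.Dict.empty,
      PySem.Dict.keys_empty, PySem.Set.update_nil_left, List.length_map, ← hSdef]
  intro hcontra
  have hlen := congrArg List.length hcontra
  rw [hA, hB, List.length_map, List.length_append] at hlen
  have := congrArg List.length hSeq
  rw [List.length_append, List.length_cons] at this
  omega


-- ===== VERDICT (by name: the statement is the Claim_ definition above) =====
theorem handle_two_sort_spec : Claim_unchanged_handle_two_sort := by
  intro ctos _ hD
  show handle_two_sort ctos = handle_two_sort_alt ctos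
  exact core (PySem.Dict.ofList ctos) (PySem.Dict.nodup_keys_ofList ctos) hD

theorem handle_two_sort_changed : Claim_changed_handle_two_sort := by
  unfold Claim_changed_handle_two_sort; decide

theorem handle_two_sort_tight : Claim_exact_handle_two_sort := by
  intro ctos _ hD
  exact core_drop (PySem.Dict.ofList ctos) (PySem.Dict.nodup_keys_ofList ctos) hD
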